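-- pv_equiv track=rewrite | github.com/naman7474/social-media-tool | vak_bot/pipeline/prompts.py | _format_hashtags
-- ===== SOURCE A (Python) =====
-- from typing import Any
--
-- def _format_hashtags(tags: Any) -> str:
--     if not isinstance(tags, dict):
--         return ""
--     items: list[str] = []
--     for values in tags.values():
--         if isinstance(values, list):
--             items.extend(str(v).strip() for v in values if isinstance(v, str) and v.strip())
--     unique = list(dict.fromkeys(items))
--     return " ".join(unique[:40])
-- ===== SOURCE B (Python) =====
-- def _format_hashtags(tags):
--     if not isinstance(tags, dict):
--         return ""
--     seen = set()
--     result = []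
--     for values in tags.values():
--         if not isinstance(values, list):
--             continue
--         for v in values:
--             if isinstance(v, str):
--                 s = v.strip()
--                 if s and s not in seen:
--                     seen.add(s)
--                     result.append(s)
--                     if len(result) == 40:
--                         return " ".join(result)
--     return " ".join(result)
-- ===== Notes on version B (the rewrite author's own statement) =====
-- stated objective: faster
-- what changed: Replaces collect-all + dict.fromkeys dedup + slice[:40] with a single fused early-terminating traversal that maintains a seen-set and result list inline and returns as soon as 40 unique tags are found.
import Mathlib
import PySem

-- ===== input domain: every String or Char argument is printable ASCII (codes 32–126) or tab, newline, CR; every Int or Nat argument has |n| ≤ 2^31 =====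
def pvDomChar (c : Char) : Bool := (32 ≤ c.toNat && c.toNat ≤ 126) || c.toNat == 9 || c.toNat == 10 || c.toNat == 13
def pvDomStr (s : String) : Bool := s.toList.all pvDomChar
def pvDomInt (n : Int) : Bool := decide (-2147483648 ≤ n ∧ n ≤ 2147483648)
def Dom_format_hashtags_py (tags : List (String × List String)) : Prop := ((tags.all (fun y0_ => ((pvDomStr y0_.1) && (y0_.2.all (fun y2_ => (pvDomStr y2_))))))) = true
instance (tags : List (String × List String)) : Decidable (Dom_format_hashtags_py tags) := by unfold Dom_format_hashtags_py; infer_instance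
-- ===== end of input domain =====

-- B fuses A's collect / dict.fromkeys-dedup / [:40] phases into one early-stopping pass
-- with an inline seen-set (objective: alternative). Under the type convention the input
-- is always a dict of str -> list[str], so the isinstance guards of both Pythons are
-- identically true and are not ported.

-- ===== PORT A =====
def format_hashtags_py (tags : List (String × List String)) : String :=
  -- items.extend(str(v).strip() for v in values if isinstance(v, str) and v.strip())
  let items : List String :=
    tags.foldl (fun acc kv =>
      acc ++ (kv.2.filter (fun v => decide (PySem.Str.strip v ≠ ""))).map PySem.Str.strip) []
  -- unique = list(dict.fromkeys(items))
  let unique := PySem.List.dedup items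
  -- " ".join(unique[:40])
  PySem.Str.join " " (PySem.List.slice unique none (some 40))

-- ===== PORT B =====
-- inner loop of Source B: for v in values (returns (seen, result, stopped))
def pvAltInner (vs : List String) (seen : PySem.Set String) (result : List String) :
    PySem.Set String × List String × Bool :=
  match vs with
  | [] => (seen, result, false)
  | v :: rest =>
    let s := PySem.Str.strip v
    if s ≠ "" ∧ ¬ (s ∈ seen) then
      let seen' := PySem.Set.add seen s
      let result' := result ++ [s]
      if result'.length = 40 then (seen', result', true)
      else pvAltInner rest seen' result'
    else pvAltInner rest seen result

-- outer loop of Source B: for values in tags.values()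
def pvAltOuter (ts : List (String × List String)) (seen : PySem.Set String)
    (result : List String) : List String :=
  match ts with
  | [] => result
  | kv :: rest =>
    match pvAltInner kv.2 seen result with
    | (seen', result', stopped) =>
      if stopped then result' else pvAltOuter rest seen' result'

def format_hashtags_py_alt (tags : List (String × List String)) : String :=
  PySem.Str.join " " (pvAltOuter tags PySem.Set.empty [])

-- ===== PRECONDITION & SPEC =====
def Spec_format_hashtags_py (tags : List (String × List String)) (out : String) : Prop := out = format_hashtags_py_alt tags
instance (tags : List (String × List String)) (out : String) : Decidable (Spec_format_hashtags_py tags out) := by unfold Spec_format_hashtags_py; infer_instance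

-- ===== CLAIM (what is proved, stated in full; the proofs are below) =====
def Claim_equal_format_hashtags_py : Prop := ∀ (tags : List (String × List String)), Dom_format_hashtags_py tags → Spec_format_hashtags_py tags (format_hashtags_py tags)

-- ===== LEMMAS AND PROOFS =====

-- one dedup step, shared shape on both sides of the proof
def pvStep (acc : List String) (v : String) : List String :=
  if PySem.Str.strip v ≠ "" then PySem.Set.add acc (PySem.Str.strip v) else acc

theorem pvStep_prefix (acc : List String) (v : String) : acc <+: pvStep acc v := by
  unfold pvStep PySem.Set.add PySem.Set.contains
  split_ifs <;> simp

theorem pvFoldl_prefix (vs : List String) (acc : List String) :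
    acc <+: vs.foldl pvStep acc := by
  induction vs generalizing acc with
  | nil => simp
  | cons v rest ih =>
    exact (pvStep_prefix acc v).trans (ih (pvStep acc v))

theorem pvFoldl2_prefix (ts : List (String × List String)) (acc : List String) :
    acc <+: ts.foldl (fun a kv => kv.2.foldl pvStep a) acc := by
  induction ts generalizing acc with
  | nil => simp
  | cons kv rest ih =>
    exact (pvFoldl_prefix kv.2 acc).trans (ih _)

theorem pvTake_of_prefix {r l : List String} (h : r <+: l) (hlen : r.length = 40) :
    l.take 40 = r := by
  obtain ⟨t, rfl⟩ := h
  simp [hlen]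

-- inner loop computes the 40-capped dedup fold over one value list
theorem pvAltInner_spec (vs : List String) (seen : List String) (h : seen.length < 40) :
    pvAltInner vs seen seen =
      ((vs.foldl pvStep seen).take 40, (vs.foldl pvStep seen).take 40,
        decide (40 ≤ (vs.foldl pvStep seen).length)) := by
  induction vs generalizing seen with
  | nil =>
    simp [pvAltInner, List.take_of_length_le (le_of_lt h), Nat.not_le.mpr h]
  | cons v rest ih =>
    simp only [pvAltInner, List.foldl_cons]
    by_cases hs : PySem.Str.strip v ≠ "" ∧ ¬ (PySem.Str.strip v ∈ seen)
    · rw [if_pos hs]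
      have hstep : pvStep seen v = seen ++ [PySem.Str.strip v] := by
        unfold pvStep PySem.Set.add PySem.Set.contains
        rw [if_pos hs.1, if_neg (by simpa using hs.2)]
      have hadd : PySem.Set.add seen (PySem.Str.strip v) = seen ++ [PySem.Str.strip v] := by
        unfold PySem.Set.add PySem.Set.contains
        rw [if_neg (by simpa using hs.2)]
      by_cases h40 : (seen ++ [PySem.Str.strip v]).length = 40
      · rw [if_pos h40]
        have hpre : seen ++ [PySem.Str.strip v] <+: rest.foldl pvStep (pvStep seen v) := by
          rw [hstep]; exact pvFoldl_prefix _ _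
        have htake := pvTake_of_prefix hpre h40
        have hlen : 40 ≤ (rest.foldl pvStep (pvStep seen v)).length := by
          have := hpre.length_le
          omega
        simp [hadd, htake, hlen]
      · rw [if_neg h40]
        have h' : (seen ++ [PySem.Str.strip v]).length < 40 := by
          simp only [List.length_append, List.length_cons, List.length_nil] at h40 ⊢
          omega
        have h'' : (pvStep seen v).length < 40 := by rw [hstep]; exact h'
        simp only [hadd, ← hstep]
        exact ih _ h''
    · rw [if_neg hs]
      have hstep : pvStep seen v = seen := by
        unfold pvStep PySem.Set.add PySem.Set.contains
        by_cases h1 : PySem.Str.strip v ≠ ""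
        · rw [if_pos h1, if_pos]
          simp only [not_and, not_not] at hs
          simpa using hs h1
        · rw [if_neg h1]
      simp only [hstep]
      exact ih seen h

-- outer loop computes the 40-capped dedup fold over all value lists
theorem pvAltOuter_spec (ts : List (String × List String)) (seen : List String)
    (h : seen.length < 40) :
    pvAltOuter ts seen seen =
      (ts.foldl (fun a kv => kv.2.foldl pvStep a) seen).take 40 := by
  induction ts generalizing seen with
  | nil => simp [pvAltOuter, List.take_of_length_le (le_of_lt h)]
  | cons kv rest ih =>
    simp only [pvAltOuter, List.foldl_cons]
    rw [pvAltInner_spec kv.2 seen h]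
    by_cases h40 : 40 ≤ (kv.2.foldl pvStep seen).length
    · simp only [h40, decide_true, if_true]
      have hpre1 : (kv.2.foldl pvStep seen).take 40 <+: kv.2.foldl pvStep seen :=
        List.take_prefix _ _
      have hpre2 := pvFoldl2_prefix rest (kv.2.foldl pvStep seen)
      have hlen : ((kv.2.foldl pvStep seen).take 40).length = 40 := by
        simp [List.length_take]
        omega
      exact (pvTake_of_prefix (hpre1.trans hpre2) hlen).symm
    · simp only [h40, decide_false]
      have hlt : (kv.2.foldl pvStep seen).length < 40 := Nat.not_le.mp h40
      rw [List.take_of_length_le (le_of_lt hlt)]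
      exact ih _ hlt

-- one value list folded with pvStep = A's filter+map extension folded with Set.add
theorem pvStep_fold_eq (vs : List String) (acc : List String) :
    vs.foldl pvStep acc =
      ((vs.filter (fun v => decide (PySem.Str.strip v ≠ ""))).map PySem.Str.strip).foldl
        PySem.Set.add acc := by
  induction vs generalizing acc with
  | nil => simp
  | cons v rest ih =>
    simp only [List.foldl_cons, List.filter_cons]
    by_cases hv : PySem.Str.strip v ≠ ""
    · rw [if_pos (by simpa using hv), List.map_cons, List.foldl_cons,
        show pvStep acc v = PySem.Set.add acc (PySem.Str.strip v) from by
          unfold pvStep; rw [if_pos hv]]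
      exact ih _
    · rw [if_neg (by simpa using hv),
        show pvStep acc v = acc from by unfold pvStep; rw [if_neg hv]]
      exact ih _

-- the fused outer fold = Set.ofList of A's items list
theorem pvFold2_eq_ofList (ts : List (String × List String)) (acc : List String) :
    ts.foldl (fun a kv => kv.2.foldl pvStep a) acc =
      (ts.foldl (fun acc kv =>
          acc ++ (kv.2.filter (fun v => decide (PySem.Str.strip v ≠ ""))).map PySem.Str.strip)
        []).foldl PySem.Set.add acc := by
  induction ts generalizing acc with
  | nil => simp
  | cons kv rest ih =>
    simp only [List.foldl_cons]
    rw [ih, PySem.List.foldl_append_eq_flatMap, PySem.List.foldl_append_eq_flatMap,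
      List.nil_append, List.nil_append, List.foldl_append, ← pvStep_fold_eq]

-- ===== VERDICT (by name: the statement is the Claim_ definition above) =====
theorem format_hashtags_py_spec : Claim_equal_format_hashtags_py := by
  intro tags _
  unfold Spec_format_hashtags_py format_hashtags_py format_hashtags_py_alt
  simp only [PySem.Set.empty]
  rw [pvAltOuter_spec tags [] (by simp),
    pvFold2_eq_ofList, ← PySem.Set.ofList_eq_foldl]
  rw [PySem.List.dedup_eq_ofList]
  congr 1
  rw [show ((40 : Int) = ((40 : Nat) : Int)) by norm_num, PySem.List.slice_to_natCast]
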